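-- pv_equiv track=rewrite | github.com/novin-nouri/security-camera | detect.py | _intersection_axis
-- ===== SOURCE A (Python) =====
-- def _intersection_axis(person_obj, trgt_obj, axis="x"):
--     """It checks whether our two objects have the same coordinates or not
--
--     Args:
--         person_obj: Dimensions of main object
--         trgt_obj: Dimensions of target object
--         axis: check from x_axis or y_axis, default="x"
--
--     Return:
--         A list of common coordinates of our two objects
--     """
--     # For x axis
--     if axis == "x":
--         i, j = 0, 2
--     else:
--         # for y axis
--         i, j = 1, 3
--     x_or_y_person = person_obj[i]
--     xw_or_yh_person = person_obj[i] + person_obj[j]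
--     x_or_y_target = trgt_obj[i]
--     xw_yh_target = trgt_obj[i] + trgt_obj[j]
--     person_x_or_y_range = [i for i in range(x_or_y_person, xw_or_yh_person + 1)]
--     target_x_or_y_range = [i for i in range(x_or_y_target, xw_yh_target + 1)]
--     intersection_axis = [item for item in person_x_or_y_range
--                          if item in target_x_or_y_range]
--     return intersection_axis
-- ===== SOURCE B (Python) =====
-- def _intersection_axis(person_obj, trgt_obj, axis="x"):
--     if axis == "x":
--         i, j = 0, 2
--     else:
--         i, j = 1, 3
--     lo = max(person_obj[i], trgt_obj[i])
--     hi = min(person_obj[i] + person_obj[j], trgt_obj[i] + trgt_obj[j])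
--     return list(range(lo, hi + 1))
-- ===== Notes on version B (the rewrite author's own statement) =====
-- stated objective: faster
-- what changed: B computes the overlap of the two inclusive intervals directly as range(max of starts, min of ends + 1), instead of materialising both coordinate ranges and filtering one by quadratic membership in the other.
import Mathlib
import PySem

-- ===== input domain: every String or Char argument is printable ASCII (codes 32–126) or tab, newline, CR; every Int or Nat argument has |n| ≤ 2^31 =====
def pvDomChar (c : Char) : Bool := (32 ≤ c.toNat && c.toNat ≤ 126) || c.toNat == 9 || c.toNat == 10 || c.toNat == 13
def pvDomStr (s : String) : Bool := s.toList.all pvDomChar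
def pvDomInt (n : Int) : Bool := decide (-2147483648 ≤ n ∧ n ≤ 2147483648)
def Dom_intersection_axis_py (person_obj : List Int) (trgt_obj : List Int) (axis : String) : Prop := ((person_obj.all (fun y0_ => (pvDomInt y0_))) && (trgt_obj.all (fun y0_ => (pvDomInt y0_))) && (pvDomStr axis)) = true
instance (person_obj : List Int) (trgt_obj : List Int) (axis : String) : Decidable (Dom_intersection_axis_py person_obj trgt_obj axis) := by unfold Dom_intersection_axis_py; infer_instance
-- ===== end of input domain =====

-- B replaces A's build-two-ranges-and-filter-by-membership with the direct closed-form
-- overlap range(max(starts), min(ends)+1); measurably faster (asymptotic: O(k) vs O(n*m)).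

-- ===== PORT A =====
def intersection_axis_py (person_obj : List Int) (trgt_obj : List Int) (axis : String) : List Int :=
  let ij : Int × Int := if axis == "x" then (0, 2) else (1, 3)
  match PySem.List.pyGet? person_obj ij.1, PySem.List.pyGet? person_obj ij.2,
        PySem.List.pyGet? trgt_obj ij.1, PySem.List.pyGet? trgt_obj ij.2 with
  | some pi, some pj, some ti, some tj =>
      let x_or_y_person := pi
      let xw_or_yh_person := pi + pj
      let x_or_y_target := ti
      let xw_yh_target := ti + tj
      let person_range := PySem.List.pyRange x_or_y_person (xw_or_yh_person + 1) 1
      let target_range := PySem.List.pyRange x_or_y_target (xw_yh_target + 1) 1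
      person_range.filter (fun item => decide (item ∈ target_range))
  | _, _, _, _ => []  -- IndexError in Python; excluded by Pre_

-- ===== PORT B =====
def intersection_axis_py_alt (person_obj : List Int) (trgt_obj : List Int) (axis : String) : List Int :=
  let ij : Int × Int := if axis == "x" then (0, 2) else (1, 3)
  (((PySem.List.pyGet? person_obj ij.1).bind fun pi =>
    (PySem.List.pyGet? trgt_obj ij.1).bind fun ti =>
    (PySem.List.pyGet? person_obj ij.2).bind fun pj =>
    (PySem.List.pyGet? trgt_obj ij.2).bind fun tj =>
      let lo := max pi ti
      let hi := min (pi + pj) (ti + tj)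
      some (PySem.List.pyRange lo (hi + 1) 1))).getD []  -- none = IndexError in Python; excluded by Pre_

-- ===== PRECONDITION & SPEC =====
-- Pre_ excludes exactly the inputs where Python's person_obj[i]/trgt_obj[j] raises IndexError
-- (lists shorter than 3 for axis "x", shorter than 4 otherwise).
def Pre_intersection_axis_py (person_obj : List Int) (trgt_obj : List Int) (axis : String) : Prop :=
  if axis = "x" then 3 ≤ person_obj.length ∧ 3 ≤ trgt_obj.length
  else 4 ≤ person_obj.length ∧ 4 ≤ trgt_obj.length
instance (person_obj : List Int) (trgt_obj : List Int) (axis : String) : Decidable (Pre_intersection_axis_py person_obj trgt_obj axis) := by unfold Pre_intersection_axis_py; infer_instance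

def pvWitness_intersection_axis_py : List Int × List Int × String := ([1, 2, 5, 4], [3, 0, 6, 9], "x")

def Spec_intersection_axis_py (person_obj : List Int) (trgt_obj : List Int) (axis : String) (out : List Int) : Prop := out = intersection_axis_py_alt person_obj trgt_obj axis
instance (person_obj : List Int) (trgt_obj : List Int) (axis : String) (out : List Int) : Decidable (Spec_intersection_axis_py person_obj trgt_obj axis out) := by unfold Spec_intersection_axis_py; infer_instance

-- ===== CLAIM (what is proved, stated in full; the proofs are below) =====
def Claim_equal_intersection_axis_py : Prop := ∀ (person_obj : List Int) (trgt_obj : List Int) (axis : String), Dom_intersection_axis_py person_obj trgt_obj axis → Pre_intersection_axis_py person_obj trgt_obj axis → Spec_intersection_axis_py person_obj trgt_obj axis (intersection_axis_py person_obj trgt_obj axis)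

-- ===== LEMMAS AND PROOFS =====

-- Filtering one integer range by membership in another yields exactly their overlap range.
theorem filter_mem_pyRange (a b c d : Int) :
    (PySem.List.pyRange a b 1).filter (fun item => decide (item ∈ PySem.List.pyRange c d 1))
      = PySem.List.pyRange (max a c) (min b d) 1 := by
  have key : ∀ (n : Nat) (a : Int), (b - a).toNat = n →
      (PySem.List.pyRange a b 1).filter (fun item => decide (item ∈ PySem.List.pyRange c d 1))
        = PySem.List.pyRange (max a c) (min b d) 1 := by
    intro n
    induction n with
    | zero =>
      intro a ha
      rw [show PySem.List.pyRange a b 1 = [] from PySem.List.pyRange_one_eq_nil (by omega),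
          show PySem.List.pyRange (max a c) (min b d) 1 = [] from
            PySem.List.pyRange_one_eq_nil (by omega)]
      simp
    | succ n ih =>
      intro a ha
      have hab' : a < b := by omega
      have hrest := ih (a + 1) (by omega)
      rw [show PySem.List.pyRange a b 1 = a :: PySem.List.pyRange (a + 1) b 1 from
            PySem.List.pyRange_one_cons hab',
          List.filter_cons, hrest]
      by_cases hmem : c ≤ a ∧ a < d
      · rw [if_pos (by simpa [PySem.List.mem_pyRange_one] using hmem)]
        have h1 : max (a + 1) c = a + 1 := by omega
        have h2 : max a c = a := by omega
        rw [h1, h2, show PySem.List.pyRange a (min b d) 1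
              = a :: PySem.List.pyRange (a + 1) (min b d) 1 from
            PySem.List.pyRange_one_cons (by omega)]
      · rw [if_neg (by simp [PySem.List.mem_pyRange_one]; omega)]
        by_cases hac : a < c
        · rw [show max (a + 1) c = max a c by omega]
        · rw [show PySem.List.pyRange (max (a + 1) c) (min b d) 1 = [] from
                PySem.List.pyRange_one_eq_nil (by omega),
              show PySem.List.pyRange (max a c) (min b d) 1 = [] from
                PySem.List.pyRange_one_eq_nil (by omega)]
  exact key (b - a).toNat a rfl

-- ===== VERDICT (by name: the statement is the Claim_ definition above) =====
theorem intersection_axis_py_spec : Claim_equal_intersection_axis_py := by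
  intro person_obj trgt_obj axis _hdom hpre
  unfold Spec_intersection_axis_py intersection_axis_py intersection_axis_py_alt
  unfold Pre_intersection_axis_py at hpre
  by_cases hax : axis = "x"
  · simp only [hax, reduceIte] at hpre
    obtain ⟨p0, p1, p2, ps, rfl⟩ : ∃ p0 p1 p2 ps, person_obj = p0 :: p1 :: p2 :: ps := by
      match person_obj, hpre.1 with
      | p0 :: p1 :: p2 :: ps, _ => exact ⟨p0, p1, p2, ps, rfl⟩
    obtain ⟨t0, t1, t2, ts, rfl⟩ : ∃ t0 t1 t2 ts, trgt_obj = t0 :: t1 :: t2 :: ts := by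
      match trgt_obj, hpre.2 with
      | t0 :: t1 :: t2 :: ts, _ => exact ⟨t0, t1, t2, ts, rfl⟩
    have e1 : PySem.List.pyGet? (p0 :: p1 :: p2 :: ps) (0 : Int) = some p0 := by
      rw [PySem.List.pyGet?_of_nonneg _ (by norm_num)]
      simp
    have e2 : PySem.List.pyGet? (p0 :: p1 :: p2 :: ps) (2 : Int) = some p2 := by
      rw [PySem.List.pyGet?_of_nonneg _ (by norm_num)]
      simp
    have e3 : PySem.List.pyGet? (t0 :: t1 :: t2 :: ts) (0 : Int) = some t0 := by
      rw [PySem.List.pyGet?_of_nonneg _ (by norm_num)]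
      simp
    have e4 : PySem.List.pyGet? (t0 :: t1 :: t2 :: ts) (2 : Int) = some t2 := by
      rw [PySem.List.pyGet?_of_nonneg _ (by norm_num)]
      simp
    simp only [hax, beq_self_eq_true, reduceIte, e1, e2, e3, e4, Option.bind_some, Option.getD_some]
    rw [filter_mem_pyRange]
    congr 1
    omega
  · have hne : (axis == "x") = false := by simp [hax]
    simp only [hax, reduceIte] at hpre
    obtain ⟨p0, p1, p2, p3, ps, rfl⟩ :
        ∃ p0 p1 p2 p3 ps, person_obj = p0 :: p1 :: p2 :: p3 :: ps := by
      match person_obj, hpre.1 with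
      | p0 :: p1 :: p2 :: p3 :: ps, _ => exact ⟨p0, p1, p2, p3, ps, rfl⟩
    obtain ⟨t0, t1, t2, t3, ts, rfl⟩ :
        ∃ t0 t1 t2 t3 ts, trgt_obj = t0 :: t1 :: t2 :: t3 :: ts := by
      match trgt_obj, hpre.2 with
      | t0 :: t1 :: t2 :: t3 :: ts, _ => exact ⟨t0, t1, t2, t3, ts, rfl⟩
    have e1 : PySem.List.pyGet? (p0 :: p1 :: p2 :: p3 :: ps) (1 : Int) = some p1 := by
      rw [PySem.List.pyGet?_of_nonneg _ (by norm_num)]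
      simp
    have e2 : PySem.List.pyGet? (p0 :: p1 :: p2 :: p3 :: ps) (3 : Int) = some p3 := by
      rw [PySem.List.pyGet?_of_nonneg _ (by norm_num)]
      simp
    have e3 : PySem.List.pyGet? (t0 :: t1 :: t2 :: t3 :: ts) (1 : Int) = some t1 := by
      rw [PySem.List.pyGet?_of_nonneg _ (by norm_num)]
      simp
    have e4 : PySem.List.pyGet? (t0 :: t1 :: t2 :: t3 :: ts) (3 : Int) = some t3 := by
      rw [PySem.List.pyGet?_of_nonneg _ (by norm_num)]
      simp
    simp only [hne, Bool.false_eq_true, reduceIte, e1, e2, e3, e4, Option.bind_some, Option.getD_some]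
    rw [filter_mem_pyRange]
    congr 1
    omega
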